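-- pv_equiv track=rewrite | github.com/IDAES/idaes-pse | idaes/dmf/cli.py | _uuid_prefix_len
-- ===== SOURCE A (Python) =====
-- def _uuid_prefix_len(uuids, step=4, maxlen=32):
--     """Get smallest multiple of `step` len prefix that gives unique values.
--
--     The algorithm is not fancy, but good enough: build *sets* of
--     the ids at increasing prefix lengths until the set has all ids (no duplicates).
--     Experimentally this takes ~.1ms for 1000 duplicate ids (the worst case).
--     """
--     full = set(uuids)
--     all_of_them = len(full)
--     for n in range(step, maxlen, step):
--         prefixes = {u[:n] for u in uuids}
--         if len(prefixes) == all_of_them: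
--             return n
--     return maxlen
-- ===== SOURCE B (Python) =====
-- def _lcp(a, b):
--     # length of the longest common prefix of a and b
--     l = 0
--     while l < len(a) and l < len(b) and a[l] == b[l]:
--         l += 1
--     return l
--
--
-- def _uuid_prefix_len(uuids, step=4, maxlen=32):
--     """Smallest multiple of `step` length prefix giving unique values.
--
--     Instead of rebuilding prefix sets at every candidate length, compute once
--     the maximum common-prefix length m over all pairs of distinct ids; a
--     prefix length n works exactly when n >= m + 1.
--     """
--     m = 0
--     rest = list(set(uuids))
--     while rest:
--         a = rest[0]
--         rest = rest[1:]
--         for b in rest: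
--             m = max(m, _lcp(a, b))
--     for n in range(step, maxlen, step):
--         if n >= m + 1:
--             return n
--     return maxlen
-- ===== Notes on version B (the rewrite author's own statement) =====
-- stated objective: alternative
-- what changed: Instead of rebuilding the set of n-character prefixes at every candidate length, B computes once the maximum longest-common-prefix length m over all pairs of distinct ids and then returns the first multiple of step that is >= m+1 (or maxlen) by pure arithmetic.
-- outside the precondition, e.g. on _uuid_prefix_len(['aaa', 'bbb'], -1, -3): A returns -1, B returns -3
import Mathlib
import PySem

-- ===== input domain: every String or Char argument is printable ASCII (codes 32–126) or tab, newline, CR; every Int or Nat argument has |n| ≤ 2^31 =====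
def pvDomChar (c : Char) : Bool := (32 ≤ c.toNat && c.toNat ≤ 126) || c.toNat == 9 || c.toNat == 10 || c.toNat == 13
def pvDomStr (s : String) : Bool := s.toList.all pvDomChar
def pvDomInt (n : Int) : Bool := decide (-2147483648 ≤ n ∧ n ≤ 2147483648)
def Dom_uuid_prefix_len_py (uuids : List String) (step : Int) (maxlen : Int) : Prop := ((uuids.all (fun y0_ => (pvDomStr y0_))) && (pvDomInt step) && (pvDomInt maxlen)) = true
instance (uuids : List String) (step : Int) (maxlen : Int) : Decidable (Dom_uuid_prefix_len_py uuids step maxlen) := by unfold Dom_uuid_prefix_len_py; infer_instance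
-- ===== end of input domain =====

-- B replaces A's repeated prefix-set rebuilding by one all-pairs maximum common-prefix
-- computation followed by an arithmetic scan of the candidate lengths (objective: alternative).

-- ===== PORT A =====
-- the 'for n in range(step, maxlen, step)' loop of A, returning maxlen on fall-through
def aLoop (uuids : List String) (all_of_them : Int) (maxlen : Int) : List Int → Int
  | [] => maxlen
  | n :: rest =>
    let prefixes := PySem.Set.ofList (uuids.map (fun u => PySem.Str.slice u none (some n)))
    if PySem.Set.len prefixes == all_of_them then n else aLoop uuids all_of_them maxlen rest

def uuid_prefix_len_py (uuids : List String) (step : Int) (maxlen : Int) : Int :=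
  let full := PySem.Set.ofList uuids
  let all_of_them := PySem.Set.len full
  aLoop uuids all_of_them maxlen (PySem.List.pyRange step maxlen step)

-- ===== PORT B =====
-- _lcp's while loop, ported as structural recursion on the two character lists (exact:
-- the loop advances exactly while both strings extend and the current characters agree)
def lcpB : List Char → List Char → Int
  | a :: as, b :: bs => if a == b then 1 + lcpB as bs else 0
  | _, _ => 0

-- B's 'while rest: a = rest[0]; rest = rest[1:]; for b in rest: m = max(m, _lcp(a, b))'
def pairMaxB : List String → Int → Int
  | [], m => m
  | a :: rest, m => pairMaxB rest (rest.foldl (fun m b => max m (lcpB a.toList b.toList)) m)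

-- B's 'for n in range(step, maxlen, step): if n >= m + 1: return n' with fall-through maxlen
def bLoop (m : Int) (maxlen : Int) : List Int → Int
  | [] => maxlen
  | n :: rest => if m + 1 ≤ n then n else bLoop m maxlen rest

def uuid_prefix_len_py_alt (uuids : List String) (step : Int) (maxlen : Int) : Int :=
  let m := pairMaxB (PySem.Set.ofList uuids) 0
  bLoop m maxlen (PySem.List.pyRange step maxlen step)

-- ===== PRECONDITION & SPEC =====
-- Pre_ excludes step = 0, where A raises ValueError (range step 0), and the corner
-- step < 0 with maxlen < step, where A's loop counts DOWN and u[:n] with negative n is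
-- Python wraparound slicing (a suffix trim, not a prefix), so the negative 'length' A
-- returns there is an implementation artefact; B returns maxlen on that corner.
def Pre_uuid_prefix_len_py (uuids : List String) (step : Int) (maxlen : Int) : Prop :=
  step ≠ 0 ∧ (0 < step ∨ step ≤ maxlen)
instance (uuids : List String) (step : Int) (maxlen : Int) : Decidable (Pre_uuid_prefix_len_py uuids step maxlen) := by unfold Pre_uuid_prefix_len_py; infer_instance

def pvWitness_uuid_prefix_len_py : List String × Int × Int := (["ab", "cd"], 4, 32)

def Spec_uuid_prefix_len_py (uuids : List String) (step : Int) (maxlen : Int) (out : Int) : Prop := out = uuid_prefix_len_py_alt uuids step maxlen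
instance (uuids : List String) (step : Int) (maxlen : Int) (out : Int) : Decidable (Spec_uuid_prefix_len_py uuids step maxlen out) := by unfold Spec_uuid_prefix_len_py; infer_instance

-- ===== CLAIM (what is proved, stated in full; the proofs are below) =====
def Claim_equal_uuid_prefix_len_py : Prop := ∀ (uuids : List String) (step : Int) (maxlen : Int), Dom_uuid_prefix_len_py uuids step maxlen → Pre_uuid_prefix_len_py uuids step maxlen → Spec_uuid_prefix_len_py uuids step maxlen (uuid_prefix_len_py uuids step maxlen)

-- ===== LEMMAS AND PROOFS =====

theorem lcpB_nonneg (a b : List Char) : 0 ≤ lcpB a b := by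
  induction a generalizing b with
  | nil => simp [lcpB]
  | cons x as ih =>
    cases b with
    | nil => simp [lcpB]
    | cons y bs =>
      simp only [lcpB]
      split
      · have := ih bs; omega
      · omega

theorem lcpB_comm (a b : List Char) : lcpB a b = lcpB b a := by
  induction a generalizing b with
  | nil => cases b <;> simp [lcpB]
  | cons x as ih =>
    cases b with
    | nil => simp [lcpB]
    | cons y bs =>
      by_cases h : x = y
      · subst h; simp [lcpB, ih]
      · simp [lcpB, h, Ne.symm h]

theorem lcpB_lt_iff (a b : List Char) (hab : a ≠ b) (k : Nat) (hk : 1 ≤ k) :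
    lcpB a b < (k : Int) ↔ a.take k ≠ b.take k := by
  induction a generalizing b k with
  | nil =>
    cases b with
    | nil => exact absurd rfl hab
    | cons y bs =>
      constructor
      · intro _ h
        cases k with
        | zero => omega
        | succ k => simp [List.take] at h
      · intro _; simp [lcpB]; omega
  | cons x as ih =>
    cases b with
    | nil =>
      constructor
      · intro _ h
        cases k with
        | zero => omega
        | succ k => simp [List.take] at h
      · intro _; simp [lcpB]; omega
    | cons y bs =>
      by_cases hxy : x = y
      · subst hxy
        have hab' : as ≠ bs := fun h => hab (by rw [h])
        cases k with
        | zero => omega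
        | succ k =>
          cases Nat.eq_zero_or_pos k with
          | inl h0 =>
            subst h0
            simp only [List.take, lcpB, beq_self_eq_true, if_true]
            constructor
            · intro h; have := lcpB_nonneg as bs; omega
            · intro h; exact absurd rfl h
          | inr hpos =>
            have := ih bs hab' k hpos
            simp only [List.take, lcpB, beq_self_eq_true, if_true]
            constructor
            · intro h hc
              have h2 : as.take k = bs.take k := by
                injection hc
              exact (this.mp (by omega)) h2
            · intro h
              have h2 : as.take k ≠ bs.take k := fun hc => h (by rw [hc])
              have := this.mpr h2
              omega
      · constructor
        · intro _ hc
          cases k with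
          | zero => omega
          | succ k => simp only [List.take] at hc; injection hc with h1 _; exact hxy h1
        · intro _
          simp only [lcpB, beq_iff_eq, if_neg hxy]
          omega

theorem innerFold_lt (a : List Char) (n : Int) :
    ∀ (rest : List String) (m : Int),
      (rest.foldl (fun m b => max m (lcpB a b.toList)) m) < n ↔
        m < n ∧ ∀ b ∈ rest, lcpB a b.toList < n := by
  intro rest
  induction rest with
  | nil => simp
  | cons b bs ih =>
    intro m
    simp only [List.foldl_cons, ih, List.mem_cons]
    constructor
    · rintro ⟨h1, h2⟩
      refine ⟨by omega, ?_⟩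
      rintro c (rfl | hc)
      · omega
      · exact h2 c hc
    · rintro ⟨h1, h2⟩
      refine ⟨by have := h2 b (Or.inl rfl); omega, ?_⟩
      exact fun c hc => h2 c (Or.inr hc)

theorem pairMaxB_lt (n : Int) :
    ∀ (l : List String) (m : Int),
      pairMaxB l m < n ↔ m < n ∧ l.Pairwise (fun a b => lcpB a.toList b.toList < n) := by
  intro l
  induction l with
  | nil => simp [pairMaxB]
  | cons a rest ih =>
    intro m
    simp only [pairMaxB, ih, innerFold_lt, List.pairwise_cons]
    tauto

theorem setLen_eq_card {α : Type} [DecidableEq α] (xs : List α) :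
    (PySem.Set.ofList xs).length = xs.toFinset.card := by
  have hnd := PySem.Set.nodup_ofList xs
  have hfs : (PySem.Set.ofList xs).toFinset = xs.toFinset := by
    ext y; simp [PySem.Set.mem_ofList]
  rw [← List.toFinset_card_of_nodup hnd, hfs]

-- the condition A tests at length n equals B's arithmetic test, for n ≥ 1
theorem main_cond (uuids : List String) (n : Int) (hn : 1 ≤ n) :
    (PySem.Set.len (PySem.Set.ofList (uuids.map (fun u => PySem.Str.slice u none (some n)))) ==
        PySem.Set.len (PySem.Set.ofList uuids)) =
      decide (pairMaxB (PySem.Set.ofList uuids) 0 + 1 ≤ n) := by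
  have hk1 : 1 ≤ n.toNat := by omega
  have hkn : (n.toNat : Int) = n := by omega
  -- the prefix map and what its equality means for two distinct strings
  have hf : ∀ a b : String, a ≠ b →
      (PySem.Str.slice a none (some n) = PySem.Str.slice b none (some n) ↔
        ¬ lcpB a.toList b.toList < n) := by
    intro a b hab
    have habl : a.toList ≠ b.toList := fun h => hab (String.toList_inj.mp h)
    have hiff := lcpB_lt_iff a.toList b.toList habl n.toNat hk1
    rw [hkn] at hiff
    unfold PySem.Str.slice PySem.Chars.slice
    rw [PySem.List.slice_to a.toList (by omega : (0:Int) ≤ n),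
        PySem.List.slice_to b.toList (by omega : (0:Int) ≤ n)]
    constructor
    · intro h hlt
      have : a.toList.take n.toNat = b.toList.take n.toNat := by
        have := congrArg String.toList h
        simpa using this
      exact (hiff.mp hlt) this
    · intro h
      by_contra hne
      have : a.toList.take n.toNat ≠ b.toList.take n.toNat := by
        intro hc; exact hne (by rw [hc])
      exact h (hiff.mpr this)
  rw [Bool.eq_iff_iff]
  simp only [beq_iff_eq, decide_eq_true_eq, PySem.Set.len, Nat.cast_inj]
  rw [setLen_eq_card, setLen_eq_card]
  have htf : (uuids.map (fun u => PySem.Str.slice u none (some n))).toFinset =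
      uuids.toFinset.image (fun u => PySem.Str.slice u none (some n)) := by
    ext y; simp
  rw [htf, Finset.card_image_iff]
  have hinj : Set.InjOn (fun u => PySem.Str.slice u none (some n)) ↑uuids.toFinset ↔
      (∀ a ∈ uuids, ∀ b ∈ uuids,
        PySem.Str.slice a none (some n) = PySem.Str.slice b none (some n) → a = b) := by
    constructor
    · intro H a ha b hb hfe
      exact H (by simpa using ha) (by simpa using hb) hfe
    · intro H a ha b hb hfe
      exact H a (by simpa using ha) b (by simpa using hb) hfe
  rw [hinj]
  have hpw : (∀ a ∈ uuids, ∀ b ∈ uuids,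
      PySem.Str.slice a none (some n) = PySem.Str.slice b none (some n) → a = b) ↔
      (PySem.Set.ofList uuids).Pairwise (fun a b => lcpB a.toList b.toList < n) := by
    constructor
    · intro H
      have hnd := PySem.Set.nodup_ofList uuids
      refine List.Pairwise.imp_of_mem ?_ hnd
      intro a b ha hb hab
      by_contra hge
      exact hab (H a ((PySem.Set.mem_ofList uuids a).mp ha)
        b ((PySem.Set.mem_ofList uuids b).mp hb) ((hf a b hab).mpr hge))
    · intro H a ha b hb hfe
      by_contra hab
      have hsymm : Symmetric (fun a b : String => lcpB a.toList b.toList < n) := by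
        intro x y h; rw [lcpB_comm]; exact h
      have hR := H.forall hsymm ((PySem.Set.mem_ofList uuids a).mpr ha)
        ((PySem.Set.mem_ofList uuids b).mpr hb) hab
      exact (hf a b hab).mp hfe hR
  rw [hpw]
  have := pairMaxB_lt n (PySem.Set.ofList uuids) 0
  constructor
  · intro h
    have := this.mpr ⟨by omega, h⟩
    omega
  · intro h
    exact (this.mp (by omega)).2

theorem loops_eq (uuids : List String) (m maxlen : Int)
    (hm : m = pairMaxB (PySem.Set.ofList uuids) 0) :
    ∀ (L : List Int), (∀ n ∈ L, 1 ≤ n) →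
      aLoop uuids (PySem.Set.len (PySem.Set.ofList uuids)) maxlen L = bLoop m maxlen L := by
  intro L
  induction L with
  | nil => intro _; simp [aLoop, bLoop]
  | cons n rest ih =>
    intro h
    have hn : 1 ≤ n := h n (List.mem_cons_self ..)
    simp only [aLoop, bLoop]
    rw [main_cond uuids n hn, ← hm]
    simp only [decide_eq_true_eq]
    split_ifs with hmn
    · rfl
    · exact ih (fun x hx => h x (List.mem_cons_of_mem _ hx))

theorem pyRange_neg_nil (a b s : Int) (hs : s < 0) (hab : a ≤ b) :
    PySem.List.pyRange a b s = [] := by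
  unfold PySem.List.pyRange
  rw [if_neg (by omega)]
  simp only
  rw [if_neg (by omega), if_neg (by omega)]
  simp

-- ===== VERDICT (by name: the statement is the Claim_ definition above) =====
theorem uuid_prefix_len_py_spec : Claim_equal_uuid_prefix_len_py := by
  intro uuids step maxlen _ hpre
  unfold Spec_uuid_prefix_len_py uuid_prefix_len_py uuid_prefix_len_py_alt
  obtain ⟨hs0, hdir⟩ := hpre
  rcases lt_trichotomy step 0 with hneg | hz | hpos
  · have hle : step ≤ maxlen := by rcases hdir with h | h <;> omega
    rw [pyRange_neg_nil step maxlen step hneg hle]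
    simp [aLoop, bLoop]
  · exact absurd hz hs0
  · symm
    exact (loops_eq uuids _ maxlen rfl (PySem.List.pyRange step maxlen step)
      (fun n hn => by
        have := (PySem.List.mem_pyRange_iff_of_pos hpos n).mp hn
        omega)).symm
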